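-- pv_equiv track=rewrite | github.com/haxul/algorithm_research | python/book/arrays.py | advance_step
-- ===== SOURCE A (Python) =====
-- from typing import List, TypeAlias
--
-- def advance_step(arr: List[int]) -> bool:
--     cur = 0
--     while cur < len(arr) - 1:
--         next_step = 0
--         idx = 0
--         right = cur + arr[cur] + 1 if cur + arr[cur] + 1 < len(arr) else len(arr)
--         left = cur + 1 if cur + 1 < len(arr) else len(arr)
--         for i in range(left, right):
--             if next_step < arr[i]:
--                 idx = i
--                 next_step = arr[i]
--         cur = idx
--         if next_step == 0:
--             return False
--
--     return True
-- ===== SOURCE B (Python) =====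
-- def _dc(arr, lo, hi):
--     # leftmost argmax of arr[lo:hi] by divide and conquer; (index, value), (0, 0) when empty
--     d = hi - lo
--     if d <= 0:
--         return (0, 0)
--     if d == 1:
--         return (lo, arr[lo])
--     if d == 2:
--         return (lo, arr[lo]) if arr[lo + 1] <= arr[lo] else (lo + 1, arr[lo + 1])
--     mid = (lo + hi) // 2
--     p = _dc(arr, lo, mid)
--     q = _dc(arr, mid, hi)
--     return q if p[1] < q[1] else p
--
--
-- def advance_step(arr):
--     n = len(arr)
--     cur = 0
--     while cur < n - 1:
--         idx, best = _dc(arr, cur + 1, min(cur + arr[cur] + 1, n))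
--         if best <= 0:
--             return False
--         cur = idx
--     return True
-- ===== Notes on version B (the rewrite author's own statement) =====
-- stated objective: alternative
-- what changed: The inner leftmost-argmax scan of each greedy window is replaced by a divide-and-conquer range-argmax recursion combined with an associative left-biased max-pair operator, instead of A's linear index loop with mutable idx/next_step state.
import Mathlib
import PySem

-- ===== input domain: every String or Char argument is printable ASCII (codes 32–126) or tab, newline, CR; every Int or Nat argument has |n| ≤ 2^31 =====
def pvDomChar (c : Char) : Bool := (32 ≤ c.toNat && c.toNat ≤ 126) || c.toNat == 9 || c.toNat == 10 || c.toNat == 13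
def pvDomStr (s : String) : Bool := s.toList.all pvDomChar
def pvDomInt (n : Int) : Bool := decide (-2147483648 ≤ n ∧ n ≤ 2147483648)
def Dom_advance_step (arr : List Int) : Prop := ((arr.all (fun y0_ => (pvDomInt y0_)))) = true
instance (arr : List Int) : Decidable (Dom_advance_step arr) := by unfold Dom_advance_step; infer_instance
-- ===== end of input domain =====

-- B replaces A's linear window scan by a divide-and-conquer range argmax (objective: alternative).

-- ===== PORT A =====
-- arr[i]; every access in this program is at an in-range nonnegative index, so getD 0 is never taken
def pvAt (arr : List Int) (i : Int) : Int := (PySem.List.pyGet? arr i).getD 0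

-- body of A's 'for i in range(left, right)' loop, state (idx, next_step)
def innerA (arr : List Int) (st : Int × Int) (i : Int) : Int × Int :=
  if st.2 < pvAt arr i then (i, pvAt arr i) else st

-- A's while loop; cur strictly increases each kept iteration, so fuel = len(arr)+1 is never exhausted
def loopA (arr : List Int) : Nat → Int → Bool
  | 0, _ => true
  | fuel+1, cur =>
    if cur < (arr.length : Int) - 1 then
      let n : Int := arr.length
      let right := if cur + pvAt arr cur + 1 < n then cur + pvAt arr cur + 1 else n
      let left := if cur + 1 < n then cur + 1 else n
      let r := (PySem.List.pyRange left right 1).foldl (innerA arr) (0, 0)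
      if r.2 == 0 then false else loopA arr fuel r.1
    else true

def advance_step (arr : List Int) : Bool := loopA arr (arr.length + 1) 0

-- ===== PORT B =====
-- divide-and-conquer leftmost argmax of arr[lo:hi]; (0,0) when empty
def dcB (arr : List Int) (lo hi : Int) : Int × Int :=
  if hle : hi - lo ≤ 0 then (0, 0)
  else if h1 : hi - lo = 1 then (lo, pvAt arr lo)
  else if h2 : hi - lo = 2 then
    if pvAt arr (lo + 1) ≤ pvAt arr lo then (lo, pvAt arr lo) else (lo + 1, pvAt arr (lo + 1))
  else
    let mid := PySem.Int.floordiv (lo + hi) 2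
    let p := dcB arr lo mid
    let q := dcB arr mid hi
    if p.2 < q.2 then q else p
termination_by (hi - lo).toNat
decreasing_by
  · have := PySem.Int.floordiv_eq_ediv_of_pos (a := lo + hi) (b := 2) (by omega)
    simp only [this]; omega
  · have := PySem.Int.floordiv_eq_ediv_of_pos (a := lo + hi) (b := 2) (by omega)
    simp only [this]; omega

def loopB (arr : List Int) : Nat → Int → Bool
  | 0, _ => true
  | fuel+1, cur =>
    if cur < (arr.length : Int) - 1 then
      let n : Int := arr.length
      let r := dcB arr (cur + 1) (min (cur + pvAt arr cur + 1) n)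
      if r.2 ≤ 0 then false else loopB arr fuel r.1
    else true

def advance_step_alt (arr : List Int) : Bool := loopB arr (arr.length + 1) 0

-- ===== PRECONDITION & SPEC =====
def Spec_advance_step (arr : List Int) (out : Bool) : Prop := out = advance_step_alt arr
instance (arr : List Int) (out : Bool) : Decidable (Spec_advance_step arr out) := by unfold Spec_advance_step; infer_instance

-- ===== CLAIM (what is proved, stated in full; the proofs are below) =====
def Claim_equal_advance_step : Prop := ∀ (arr : List Int), Dom_advance_step arr → Spec_advance_step arr (advance_step arr)

-- ===== LEMMAS AND PROOFS =====

-- the left-biased max-pair combine, as a named operator for the proofs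
def opB (p q : Int × Int) : Int × Int := if p.2 < q.2 then q else p

theorem opB_assoc (p q r : Int × Int) : opB (opB p q) r = opB p (opB q r) := by
  unfold opB; split_ifs <;> simp_all <;> omega

theorem opB_snd_le (p q : Int × Int) : p.2 ≤ (opB p q).2 := by
  unfold opB; split_ifs <;> omega

theorem innerA_eq_opB (arr : List Int) (st : Int × Int) (i : Int) :
    innerA arr st i = opB st (i, pvAt arr i) := rfl

-- A's window fold equals B's divide-and-conquer argmax, combined with the accumulator
theorem fold_eq_dc (arr : List Int) :
    ∀ k (lo hi : Int), (hi - lo).toNat = k → ∀ acc : Int × Int, 0 ≤ acc.2 →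
      (PySem.List.pyRange lo hi 1).foldl (innerA arr) acc = opB acc (dcB arr lo hi) := by
  intro k
  induction k using Nat.strong_induction_on with
  | _ k ih =>
    intro lo hi hk acc hacc
    by_cases hle : hi - lo ≤ 0
    · rw [PySem.List.pyRange_one_eq_nil (by omega)]
      rw [dcB]; simp only [hle, dif_pos]
      unfold opB; simp only [List.foldl_nil]
      split_ifs with h
      · omega
      · rfl
    · by_cases h1 : hi - lo = 1
      · have : hi = lo + 1 := by omega
        subst this
        rw [PySem.List.pyRange_one_singleton]
        rw [dcB]; simp only [hle, dif_neg, not_false_iff]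
        simp only [dif_pos h1]
        simp [List.foldl, innerA_eq_opB]
      · have h2 : 2 ≤ hi - lo := by omega
        set mid := PySem.Int.floordiv (lo + hi) 2 with hmid
        have hed : mid = (lo + hi) / 2 :=
          PySem.Int.floordiv_eq_ediv_of_pos (a := lo + hi) (b := 2) (by omega)
        have hlomid : lo < mid := by rw [hed]; omega
        have hmidhi : mid < hi := by rw [hed]; omega
        rw [PySem.List.pyRange_one_append lo mid hi (by omega) (by omega)]
        rw [List.foldl_append]
        rw [ih (mid - lo).toNat (by omega) lo mid rfl acc hacc]
        rw [ih (hi - mid).toNat (by omega) mid hi rfl _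
          (le_trans hacc (opB_snd_le acc (dcB arr lo mid)))]
        rw [opB_assoc]
        conv_rhs => rw [dcB]
        by_cases h2 : hi - lo = 2
        · -- d = 2: B's explicit two-element compare is opB of the two leaves
          simp only [hle, dif_neg, not_false_iff, dif_neg h1, dif_pos h2]
          have hm2 : mid = lo + 1 := by rw [hed]; omega
          have hhi : hi = lo + 2 := by omega
          rw [hm2, hhi]
          rw [dcB, dcB]
          simp only [show lo + 1 - lo = 1 from by omega, dif_pos,
            show lo + 2 - (lo + 1) = 1 from by omega]
          unfold opB
          split_ifs <;> first | rfl | omega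
        · simp only [hle, dif_neg, not_false_iff, dif_neg h1, dif_neg h2]
          rw [← hmid]
          unfold opB
          rfl

theorem loopA_eq_loopB (arr : List Int) :
    ∀ fuel cur, loopA arr fuel cur = loopB arr fuel cur := by
  intro fuel
  induction fuel with
  | zero => intro cur; rfl
  | succ f ihf =>
    intro cur
    rw [loopA, loopB]
    split_ifs with hcur
    · have hleft : (if cur + 1 < (arr.length : Int) then cur + 1 else (arr.length : Int)) = cur + 1 := by
        split_ifs with h
        · rfl
        · omega
      have hright : (if cur + pvAt arr cur + 1 < (arr.length : Int) then cur + pvAt arr cur + 1 else (arr.length : Int))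
          = min (cur + pvAt arr cur + 1) (arr.length : Int) := by
        split_ifs with h <;> omega
      simp only [hleft, hright,
        fold_eq_dc arr (min (cur + pvAt arr cur + 1) (arr.length : Int) - (cur + 1)).toNat
          (cur + 1) (min (cur + pvAt arr cur + 1) (arr.length : Int)) rfl (0, 0) (by simp)]
      set rB := dcB arr (cur + 1) (min (cur + pvAt arr cur + 1) (arr.length : Int)) with hrB
      by_cases hpos : rB.2 ≤ 0
      · -- window max not positive: A's fold stays at (0,0), both return false
        have : opB (0, 0) rB = (0, 0) := by unfold opB; split_ifs with h <;> [omega; rfl]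
        rw [this]
        simp [hpos]
      · have : opB (0, 0) rB = rB := by unfold opB; split_ifs with h <;> [rfl; omega]
        rw [this]
        have h0 : ¬(rB.2 == 0) = true := by simp; omega
        simp only [if_neg h0, if_neg hpos]
        exact ihf _
    · rfl

-- ===== VERDICT (by name: the statement is the Claim_ definition above) =====
theorem advance_step_spec : Claim_equal_advance_step := by
  intro arr _
  unfold Spec_advance_step advance_step advance_step_alt
  exact loopA_eq_loopB arr (arr.length + 1) 0
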